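-- pv_equiv track=rewrite | github.com/yazanh-beep/python_utils | net_map.py | format_uplinks
-- ===== SOURCE A (Python) =====
-- from collections import defaultdict
--
-- def clean_hostname(hostname):
--     """
--     Clean hostname by removing .CAM.INT or other domain suffixes if present.
--     Returns the base hostname.
--     """
--     if not hostname:
--         return ""
--     # Remove common domain suffixes
--     for suffix in ['.CAM.INT', '.cam.int', '.local', '.cisco.com', '.simplex.net', '.jci.net', '.JCI.net']:
--         if hostname.endswith(suffix):
--             return hostname[:-len(suffix)]
--     return hostname
--
-- def is_valid_uplink(neighbor):
--     """
--     Determines if a neighbor is a valid uplink/aggregate switch.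
--     """
--     # If it has an IP, we treat it as a valid switch neighbor
--     if neighbor.get('neighbor_mgmt_ip'):
--         return True
--
--     # Also treat it as valid if we are inferring relationships for unvisited devices
--     # (The calling logic determines context)
--     return False
--
-- def format_uplinks(neighbors, current_hostname):
--     """
--     Format switch uplinks for a main device entry.
--     """
--     uplink_connections = defaultdict(list)
--     clean_current = clean_hostname(current_hostname)
--
--     for neighbor in neighbors:
--         if is_valid_uplink(neighbor):
--             neighbor_hostname = neighbor.get('neighbor_hostname', '')
--             clean_name = clean_hostname(neighbor_hostname)
--
--             if clean_name == clean_current: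
--                 continue
--
--             connection_info = {
--                 'local_port': neighbor.get('local_interface', 'Unknown'),
--                 'remote_port': neighbor.get('remote_interface', 'Unknown'),
--                 'agg_full_name': clean_name
--             }
--             uplink_connections[clean_name].append(connection_info)
--
--     return generate_uplink_strings(uplink_connections)
--
-- def generate_uplink_strings(uplink_connections):
--     """Helper to convert connection dict to string format."""
--     if not uplink_connections:
--         return "", ""
--
--     agg_names = []
--     uplink_details = []
--
--     for agg_hostname, connections in sorted(uplink_connections.items()):
--         agg_names.append(agg_hostname)
--
--         if len(connections) == 1:
--             conn = connections[0]
--             # Standard format: On [Switch]: Local [Port] -> Remote [Port]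
--             uplink_details.append(f"On {agg_hostname}: Local {conn['local_port']} -> Remote {conn['remote_port']}")
--         else:
--             ports_info = []
--             for idx, conn in enumerate(connections, 1):
--                 ports_info.append(f"Link {idx}: Local {conn['local_port']} -> Remote {conn['remote_port']}")
--             uplink_details.append(f"On {agg_hostname}: {'; '.join(ports_info)}")
--
--     return " and ".join(agg_names), " | ".join(uplink_details)
-- ===== SOURCE B (Python) =====
-- SUFFIXES = ['.CAM.INT', '.cam.int', '.local', '.cisco.com', '.simplex.net', '.jci.net', '.JCI.net']
--
--
-- def _clean(hostname):
--     suf = next((s for s in SUFFIXES if hostname.endswith(s)), None)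
--     return hostname[:-len(suf)] if suf else hostname
--
--
-- def _fmt(name, group):
--     if len(group) == 1:
--         local, remote = group[0]
--         return f"On {name}: Local {local} -> Remote {remote}"
--     links = "; ".join(f"Link {i}: Local {l} -> Remote {r}"
--                       for i, (l, r) in enumerate(group, 1))
--     return f"On {name}: {links}"
--
--
-- def format_uplinks(neighbors, current_hostname):
--     cur = _clean(current_hostname)
--     conns = []
--     for nb in neighbors:
--         if not nb.get('neighbor_mgmt_ip'):
--             continue
--         name = _clean(nb.get('neighbor_hostname', ''))
--         if name != cur:
--             conns.append((name,
--                           nb.get('local_interface', 'Unknown'),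
--                           nb.get('remote_interface', 'Unknown')))
--     if not conns:
--         return "", ""
--     names = sorted({n for n, _, _ in conns})
--     details = [_fmt(name, [(l, r) for n, l, r in conns if n == name])
--                for name in names]
--     return " and ".join(names), " | ".join(details)
-- ===== Notes on version B (the rewrite author's own statement) =====
-- stated objective: alternative
-- what changed: Replaced A's defaultdict-grouping followed by sorted(dict.items()) with a single filtered flat list of (clean_name, local, remote) triples, sorted distinct names and one filter pass per name to rebuild each group; no dict and no connection_info dicts are built.
import Mathlib
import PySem

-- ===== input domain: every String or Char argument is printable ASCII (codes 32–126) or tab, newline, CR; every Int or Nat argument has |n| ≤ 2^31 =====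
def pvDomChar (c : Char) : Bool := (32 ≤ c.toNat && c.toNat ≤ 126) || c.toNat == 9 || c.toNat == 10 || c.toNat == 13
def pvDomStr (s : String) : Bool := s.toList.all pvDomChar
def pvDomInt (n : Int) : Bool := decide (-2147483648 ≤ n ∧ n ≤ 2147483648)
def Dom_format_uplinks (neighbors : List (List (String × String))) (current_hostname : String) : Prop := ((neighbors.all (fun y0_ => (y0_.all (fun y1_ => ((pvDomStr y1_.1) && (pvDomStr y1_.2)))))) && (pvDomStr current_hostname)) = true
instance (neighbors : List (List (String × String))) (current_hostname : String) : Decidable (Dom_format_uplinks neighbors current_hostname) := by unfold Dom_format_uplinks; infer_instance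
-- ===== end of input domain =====

-- B replaces A's defaultdict-grouping-then-sorted-keys by a flat filtered list of
-- (name, local, remote) triples, sorted distinct names and a per-name filter pass
-- (objective: alternative decomposition, same observable result).


-- ===== PORT A =====
def pvSuffixes : List String := [".CAM.INT", ".cam.int", ".local", ".cisco.com", ".simplex.net", ".jci.net", ".JCI.net"]

-- A's 'for suffix in [...]: if hostname.endswith(suffix): return hostname[:-len(suffix)]'
def cleanLoopA (hostname : String) : List String → String
  | [] => hostname
  | suffix :: rest =>
      if PySem.Str.endswith hostname suffix then
        PySem.Str.slice hostname none (some (-(PySem.Str.len suffix)))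
      else cleanLoopA hostname rest

def clean_hostname (hostname : String) : String :=
  if hostname = "" then "" else cleanLoopA hostname pvSuffixes

-- neighbor.get('neighbor_mgmt_ip') is truthy iff present and non-empty: getD '' conflates
-- the two falsy cases exactly as Python's truthiness does.
def is_valid_uplink (neighbor : List (String × String)) : Bool :=
  !((PySem.Dict.mk neighbor).getD "neighbor_mgmt_ip" "" == "")

-- the connection_info dict literal (three successive insertions)
def connInfoA (neighbor : List (String × String)) (clean_name : String) : PySem.Dict String String :=
  ((PySem.Dict.empty.insert "local_port" ((PySem.Dict.mk neighbor).getD "local_interface" "Unknown")).insert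
      "remote_port" ((PySem.Dict.mk neighbor).getD "remote_interface" "Unknown")).insert
      "agg_full_name" clean_name

-- generate_uplink_strings; 'if not uplink_connections' is dict emptiness = items = [].
-- sorted(d.items()) compares (key, value) tuples but keys are unique, so it sorts by key;
-- conn['local_port'] / conn['remote_port'] are always-present keys, ported as getD "" (exact here);
-- connections[0] is in range in its branch (length == 1), ported as pyGetD with a dummy default.
def generate_uplink_strings (uplink_connections : PySem.Dict String (List (PySem.Dict String String))) : String × String :=
  if uplink_connections.items = [] then ("", "")
  else
    let sortedItems := PySem.List.sorted uplink_connections.items (fun p => p.1)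
    let acc := sortedItems.foldl (fun acc item =>
      (acc.1 ++ [item.1],
       acc.2 ++ [
        if item.2.length == 1 then
          let conn := PySem.List.pyGetD item.2 0 PySem.Dict.empty
          "On " ++ item.1 ++ ": Local " ++ conn.getD "local_port" "" ++ " -> Remote " ++ conn.getD "remote_port" ""
        else
          let ports_info := (PySem.List.enumerate item.2 1).foldl (fun ps p =>
            ps ++ ["Link " ++ PySem.Int.toStr p.1 ++ ": Local " ++ p.2.getD "local_port" "" ++
                   " -> Remote " ++ p.2.getD "remote_port" ""]) []
          "On " ++ item.1 ++ ": " ++ PySem.Str.join "; " ports_info])) ([], [])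
    (PySem.Str.join " and " acc.1, PySem.Str.join " | " acc.2)

def format_uplinks (neighbors : List (List (String × String))) (current_hostname : String) : String × String :=
  let clean_current := clean_hostname current_hostname
  let uplink_connections := neighbors.foldl (fun d neighbor =>
    if is_valid_uplink neighbor then
      let clean_name := clean_hostname ((PySem.Dict.mk neighbor).getD "neighbor_hostname" "")
      if clean_name = clean_current then d
      else d.modify clean_name [] (fun x => x ++ [connInfoA neighbor clean_name])
    else d) PySem.Dict.empty
  generate_uplink_strings uplink_connections

-- ===== PORT B =====
-- Source B's _clean: first matching suffix via next(...), else the hostname unchanged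
def cleanAlt (hostname : String) : String :=
  match pvSuffixes.find? (fun s => PySem.Str.endswith hostname s) with
  | some suf => PySem.Str.slice hostname none (some (-(PySem.Str.len suf)))
  | none => hostname

-- Source B's _fmt(name, group) over (local, remote) pairs; group[0] in range in its branch
def fmtAlt (name : String) (group : List (String × String)) : String :=
  if group.length == 1 then
    let p := PySem.List.pyGetD group 0 ("", "")
    "On " ++ name ++ ": Local " ++ p.1 ++ " -> Remote " ++ p.2
  else
    let links := PySem.Str.join "; " ((PySem.List.enumerate group 1).map (fun q =>
      "Link " ++ PySem.Int.toStr q.1 ++ ": Local " ++ q.2.1 ++ " -> Remote " ++ q.2.2))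
    "On " ++ name ++ ": " ++ links

def format_uplinks_alt (neighbors : List (List (String × String))) (current_hostname : String) : String × String :=
  let cur := cleanAlt current_hostname
  let conns := neighbors.foldl (fun acc nb =>
    if !((PySem.Dict.mk nb).getD "neighbor_mgmt_ip" "" == "") then
      let name := cleanAlt ((PySem.Dict.mk nb).getD "neighbor_hostname" "")
      if name ≠ cur then
        acc ++ [(name, (PySem.Dict.mk nb).getD "local_interface" "Unknown",
                 (PySem.Dict.mk nb).getD "remote_interface" "Unknown")]
      else acc
    else acc) []
  if conns = [] then ("", "")
  else
    let names := PySem.List.sorted (PySem.Set.ofList (conns.map (fun c => c.1))) (fun x => x)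
    let details := names.map (fun name =>
      fmtAlt name ((conns.filter (fun c => c.1 == name)).map (fun c => (c.2.1, c.2.2))))
    (PySem.Str.join " and " names, PySem.Str.join " | " details)

-- ===== PRECONDITION & SPEC =====
def Spec_format_uplinks (neighbors : List (List (String × String))) (current_hostname : String) (out : String × String) : Prop := out = format_uplinks_alt neighbors current_hostname
instance (neighbors : List (List (String × String))) (current_hostname : String) (out : String × String) : Decidable (Spec_format_uplinks neighbors current_hostname out) := by unfold Spec_format_uplinks; infer_instance

-- ===== CLAIM (what is proved, stated in full; the proofs are below) =====
def Claim_equal_format_uplinks : Prop := ∀ (neighbors : List (List (String × String))) (current_hostname : String), Dom_format_uplinks neighbors current_hostname → Spec_format_uplinks neighbors current_hostname (format_uplinks neighbors current_hostname)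

-- ===== LEMMAS AND PROOFS =====

-- proof-side abbreviations for the per-neighbor data both loops extract
def pvName (nb : List (String × String)) : String :=
  cleanAlt ((PySem.Dict.mk nb).getD "neighbor_hostname" "")
def pvLocal (nb : List (String × String)) : String :=
  (PySem.Dict.mk nb).getD "local_interface" "Unknown"
def pvRemote (nb : List (String × String)) : String :=
  (PySem.Dict.mk nb).getD "remote_interface" "Unknown"
def pvKeep (cur : String) (nb : List (String × String)) : Bool :=
  !((PySem.Dict.mk nb).getD "neighbor_mgmt_ip" "" == "") && !(pvName nb == cur)
def pvPair (nb : List (String × String)) : String × PySem.Dict String String :=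
  (pvName nb, connInfoA nb (pvName nb))
def pvTriple (nb : List (String × String)) : String × String × String :=
  (pvName nb, pvLocal nb, pvRemote nb)

theorem cleanLoopA_eq (hostname : String) (l : List String) :
    cleanLoopA hostname l =
      (match l.find? (fun s => PySem.Str.endswith hostname s) with
       | some suf => PySem.Str.slice hostname none (some (-(PySem.Str.len suf)))
       | none => hostname) := by
  induction l with
  | nil => rfl
  | cons s rest ih =>
      by_cases h : PySem.Chars.endswith hostname.toList s.toList
      · simp [cleanLoopA, List.find?, PySem.Str.endswith, h]
      · simp only [Bool.not_eq_true] at h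
        simp [cleanLoopA, List.find?, PySem.Str.endswith, h, ih]

theorem clean_eq (hostname : String) : clean_hostname hostname = cleanAlt hostname := by
  unfold clean_hostname
  by_cases h : hostname = ""
  · subst h; decide
  · rw [if_neg h, cleanLoopA_eq]; rfl

theorem dictA_eq (neighbors : List (List (String × String))) (cur : String) :
    neighbors.foldl (fun d neighbor =>
      if is_valid_uplink neighbor then
        let clean_name := cleanAlt ((PySem.Dict.mk neighbor).getD "neighbor_hostname" "")
        if clean_name = cur then d
        else d.modify clean_name [] (fun x => x ++ [connInfoA neighbor clean_name])
      else d) PySem.Dict.empty =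
    ((neighbors.filter (pvKeep cur)).map pvPair).foldl
      (fun d p => d.modify p.1 [] (fun x => x ++ [p.2])) PySem.Dict.empty := by
  have h1 : neighbors.foldl (fun d neighbor =>
      if is_valid_uplink neighbor then
        let clean_name := cleanAlt ((PySem.Dict.mk neighbor).getD "neighbor_hostname" "")
        if clean_name = cur then d
        else d.modify clean_name [] (fun x => x ++ [connInfoA neighbor clean_name])
      else d) PySem.Dict.empty =
      neighbors.foldl (fun d nb =>
        if pvKeep cur nb = true then
          d.modify (pvName nb) [] (fun x => x ++ [connInfoA nb (pvName nb)])
        else d) PySem.Dict.empty := by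
    apply PySem.List.foldl_congr_mem
    intro acc x _
    by_cases hv : is_valid_uplink x
    · by_cases hn : pvName x = cur
      · simp [pvKeep, is_valid_uplink, pvName] at *
        simp [hv, hn]
      · simp [pvKeep, is_valid_uplink, pvName] at *
        simp [hv, hn]
    · simp only [Bool.not_eq_true] at hv
      simp [pvKeep, is_valid_uplink, pvName] at *
      simp [hv]
  rw [h1, PySem.List.foldl_if_eq_foldl_filter, List.foldl_map]
  rfl

theorem connsB_eq (neighbors : List (List (String × String))) (cur : String) :
    neighbors.foldl (fun acc nb =>
      if !((PySem.Dict.mk nb).getD "neighbor_mgmt_ip" "" == "") then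
        let name := cleanAlt ((PySem.Dict.mk nb).getD "neighbor_hostname" "")
        if name ≠ cur then
          acc ++ [(name, (PySem.Dict.mk nb).getD "local_interface" "Unknown",
                   (PySem.Dict.mk nb).getD "remote_interface" "Unknown")]
        else acc
      else acc) [] =
    (neighbors.filter (pvKeep cur)).map pvTriple := by
  have h1 : neighbors.foldl (fun acc nb =>
      if !((PySem.Dict.mk nb).getD "neighbor_mgmt_ip" "" == "") then
        let name := cleanAlt ((PySem.Dict.mk nb).getD "neighbor_hostname" "")
        if name ≠ cur then
          acc ++ [(name, (PySem.Dict.mk nb).getD "local_interface" "Unknown",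
                   (PySem.Dict.mk nb).getD "remote_interface" "Unknown")]
        else acc
      else acc) ([] : List (String × String × String)) =
      neighbors.foldl (fun acc nb =>
        if pvKeep cur nb = true then acc ++ [pvTriple nb] else acc) [] := by
    apply PySem.List.foldl_congr_mem
    intro acc x _
    by_cases hv : ((PySem.Dict.mk x).getD "neighbor_mgmt_ip" "" == "") = false
    · by_cases hn : pvName x = cur
      · simp [pvKeep, pvName, pvTriple, pvLocal, pvRemote] at *
        simp [hv, hn]
      · simp [pvKeep, pvName, pvTriple, pvLocal, pvRemote] at *
        simp [hv, hn]
    · simp only [Bool.not_eq_false] at hv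
      simp [pvKeep, pvName, pvTriple, pvLocal, pvRemote] at *
      simp [hv]
  rw [h1, PySem.List.foldl_append_if]
  simp

-- the dict A's loop builds, and the sorted distinct names B computes, over the filtered list F
def pvDict (F : List (List (String × String))) : PySem.Dict String (List (PySem.Dict String String)) :=
  (F.map pvPair).foldl (fun d p => d.modify p.1 [] (fun x => x ++ [p.2])) PySem.Dict.empty
def pvNames (F : List (List (String × String))) : List String :=
  PySem.List.sorted (PySem.Set.ofList ((F.map pvTriple).map (fun c => c.1))) (fun x => x)
-- the per-item detail string of A's generate_uplink_strings loop
@[reducible] def pvDetailA (item : String × List (PySem.Dict String String)) : String :=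
  if item.2.length == 1 then
    let conn := PySem.List.pyGetD item.2 0 PySem.Dict.empty
    "On " ++ item.1 ++ ": Local " ++ conn.getD "local_port" "" ++ " -> Remote " ++ conn.getD "remote_port" ""
  else
    let ports_info := (PySem.List.enumerate item.2 1).foldl (fun ps p =>
      ps ++ ["Link " ++ PySem.Int.toStr p.1 ++ ": Local " ++ p.2.getD "local_port" "" ++
             " -> Remote " ++ p.2.getD "remote_port" ""]) []
    "On " ++ item.1 ++ ": " ++ PySem.Str.join "; " ports_info

theorem pvEnumerate_map {α β : Type} (f : α → β) (l : List α) (s : Int) :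
    PySem.List.enumerate (l.map f) s = (PySem.List.enumerate l s).map (fun p => (p.1, f p.2)) := by
  induction l generalizing s with
  | nil => simp [PySem.List.enumerate_nil]
  | cons x xs ih => simp [PySem.List.enumerate_cons, ih]

theorem pvSet_ofList_eq_nil {α : Type} [BEq α] [LawfulBEq α] (xs : List α) :
    PySem.Set.ofList xs = [] ↔ xs = [] := by
  constructor
  · intro h
    rw [List.eq_nil_iff_forall_not_mem]
    intro x hx
    have := (PySem.Set.mem_ofList (xs := xs) (y := x)).2 hx
    simp [h] at this
  · intro h; simp [h, PySem.Set.ofList_nil]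

theorem pvKeys_dict (F : List (List (String × String))) :
    (pvDict F).keys = PySem.Set.ofList ((F.map pvPair).map (fun p => p.1)) := by
  unfold pvDict
  rw [PySem.Dict.keys_foldl_modify_key (F.map pvPair)
      (fun (p : String × PySem.Dict String String) => p.1) []
      (fun _ (p : String × PySem.Dict String String) => fun x => x ++ [p.2]) PySem.Dict.empty]
  simp [PySem.Set.update_nil_left]

theorem pvNodup_keys (F : List (List (String × String))) : (pvDict F).keys.Nodup := by
  unfold pvDict
  exact PySem.Dict.nodup_keys_foldl_modify_key (F.map pvPair)
    (fun (p : String × PySem.Dict String String) => p.1) []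
    (fun _ (p : String × PySem.Dict String String) => fun x => x ++ [p.2]) _ (by simp)

theorem pvMapFst (F : List (List (String × String))) :
    (F.map pvTriple).map (fun c => c.1) = (F.map pvPair).map (fun p => p.1) := by
  simp [List.map_map, pvPair, pvTriple, Function.comp]

theorem pvItems_eq_nil (F : List (List (String × String))) :
    (pvDict F).items = [] ↔ F = [] := by
  constructor
  · intro h
    have hkeys0 : (pvDict F).keys = [] := by
      simp only [PySem.Dict.keys, h, List.map_nil]
    rw [pvKeys_dict] at hkeys0
    have h2 := (pvSet_ofList_eq_nil _).1 hkeys0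
    simpa using h2
  · intro h; subst h; rfl

theorem pvSorted_items (F : List (List (String × String))) :
    PySem.List.sorted (pvDict F).items (fun p => p.1) =
      (pvNames F).map (fun k => (k, (pvDict F).getD k [])) := by
  apply PySem.List.sorted_eq_of_perm_of_pairwise_lt
  · rw [PySem.Dict.items_eq_map_keys (pvDict F) (pvNodup_keys F) [], pvKeys_dict]
    apply List.Perm.map
    unfold pvNames
    rw [pvMapFst]
    exact PySem.List.sorted_perm _ _ _
  · rw [List.pairwise_map]
    exact PySem.List.sorted_ofList_pairwise_lt _

theorem pvFmt_eq (G : List (List (String × String))) (k : String) :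
    pvDetailA (k, G.map (fun nb => connInfoA nb (pvName nb))) =
      fmtAlt k (G.map (fun nb => (pvLocal nb, pvRemote nb))) := by
  match G with
  | [] => simp [pvDetailA, fmtAlt, PySem.List.enumerate_nil]
  | [nb] => simp [pvDetailA, fmtAlt, connInfoA, PySem.Dict.getD_insert,
      PySem.List.pyGetD_zero_cons, pvLocal, pvRemote]
  | nb1 :: nb2 :: rest =>
      have hlen : (((nb1 :: nb2 :: rest).map (fun nb => connInfoA nb (pvName nb))).length == 1) = false := by
        simp
      have hlen2 : (((nb1 :: nb2 :: rest).map (fun nb => (pvLocal nb, pvRemote nb))).length == 1) = false := by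
        simp
      simp only [pvDetailA, fmtAlt, hlen, hlen2, Bool.false_eq_true, if_false,
        PySem.List.foldl_append_singleton_eq_map, pvEnumerate_map, List.map_map,
        List.nil_append]
      congr 1

theorem pvDetail_eq (F : List (List (String × String))) (k : String) :
    pvDetailA (k, (pvDict F).getD k []) =
      fmtAlt k (((F.map pvTriple).filter (fun c => c.1 == k)).map (fun c => (c.2.1, c.2.2))) := by
  have hA : (pvDict F).getD k [] =
      (F.filter (fun nb => pvName nb == k)).map (fun nb => connInfoA nb (pvName nb)) := by
    unfold pvDict
    rw [PySem.Dict.getD_foldl_modify_append]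
    simp [List.filter_map, List.map_map]
    rfl
  have hB : ((F.map pvTriple).filter (fun c => c.1 == k)).map (fun c => (c.2.1, c.2.2)) =
      (F.filter (fun nb => pvName nb == k)).map (fun nb => (pvLocal nb, pvRemote nb)) := by
    simp [List.filter_map, List.map_map]
    rfl
  rw [hA, hB]
  exact pvFmt_eq _ k

-- ===== VERDICT (by name: the statement is the Claim_ definition above) =====
theorem format_uplinks_spec : Claim_equal_format_uplinks := by
  unfold Claim_equal_format_uplinks Spec_format_uplinks
  intro neighbors ch _
  unfold format_uplinks format_uplinks_alt generate_uplink_strings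
  simp only [clean_eq]
  rw [dictA_eq neighbors (cleanAlt ch), connsB_eq neighbors (cleanAlt ch)]
  rw [show List.foldl (fun d p => d.modify p.1 [] fun x => x ++ [p.2]) PySem.Dict.empty
        (List.map pvPair (List.filter (pvKeep (cleanAlt ch)) neighbors)) =
      pvDict (List.filter (pvKeep (cleanAlt ch)) neighbors) from rfl]
  rw [show PySem.List.sorted (PySem.Set.ofList
        (List.map (fun c => c.1) (List.map pvTriple (List.filter (pvKeep (cleanAlt ch)) neighbors))))
        (fun x => x) =
      pvNames (List.filter (pvKeep (cleanAlt ch)) neighbors) from rfl]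
  by_cases hF : neighbors.filter (pvKeep (cleanAlt ch)) = []
  · rw [hF]; rfl
  · rw [if_neg (fun h => hF ((pvItems_eq_nil _).mp h)),
        if_neg (fun h => hF (List.map_eq_nil_iff.mp h))]
    rw [pvSorted_items]
    rw [PySem.List.foldl_prod_mk
        (f := fun (l : List String) (item : String × List (PySem.Dict String String)) => l ++ [item.1])
        (g := fun (l : List String) (item : String × List (PySem.Dict String String)) => l ++ [pvDetailA item])]
    rw [PySem.List.foldl_append_singleton_eq_map
        (f := fun (item : String × List (PySem.Dict String String)) => item.1),
      PySem.List.foldl_append_singleton_eq_map (f := pvDetailA)]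
    simp only [List.nil_append, List.map_map]
    congr 1
    · apply congrArg
      simp [Function.comp_def]
    · apply congrArg
      apply List.map_congr_left
      intro k _
      exact pvDetail_eq _ k
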